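-- pv_equiv track=rewrite | github.com/sabare20/tbc_group_project_1 | group_project_1/tie_functions.py | max_value_count
-- ===== SOURCE A (Python) =====
-- def max_value_count(cards):
--     players_max_value_count = {}
--     for player, cards in cards.items():
--         cards_dict = {}
--         for card in cards:
--             card_value = card[:-1] if card[:-1].isdigit() else card[0]
--             cards_dict[card_value] = cards_dict.get(card_value, 0) + 1
--         max_value_count = max(cards_dict.values())
--         players_max_value_count[player] = max_value_count
--     return players_max_value_count
-- ===== SOURCE B (Python) =====
-- def max_value_count(cards):
--     players_max_value_count = {}
--     for player, hand in cards.items():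
--         values = sorted(card[:-1] if card[:-1].isdigit() else card[0] for card in hand)
--         best = 0
--         run = 0
--         prev = None
--         for v in values:
--             run = run + 1 if v == prev else 1
--             prev = v
--             if run > best:
--                 best = run
--         players_max_value_count[player] = best
--     return players_max_value_count
-- ===== Notes on version B (the rewrite author's own statement) =====
-- stated objective: alternative
-- what changed: A counts value multiplicities per hand in a dict and takes max over the counts; B sorts the extracted values per hand and takes the longest run of equal consecutive values in a single scan, with no counting dict.
import Mathlib
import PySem

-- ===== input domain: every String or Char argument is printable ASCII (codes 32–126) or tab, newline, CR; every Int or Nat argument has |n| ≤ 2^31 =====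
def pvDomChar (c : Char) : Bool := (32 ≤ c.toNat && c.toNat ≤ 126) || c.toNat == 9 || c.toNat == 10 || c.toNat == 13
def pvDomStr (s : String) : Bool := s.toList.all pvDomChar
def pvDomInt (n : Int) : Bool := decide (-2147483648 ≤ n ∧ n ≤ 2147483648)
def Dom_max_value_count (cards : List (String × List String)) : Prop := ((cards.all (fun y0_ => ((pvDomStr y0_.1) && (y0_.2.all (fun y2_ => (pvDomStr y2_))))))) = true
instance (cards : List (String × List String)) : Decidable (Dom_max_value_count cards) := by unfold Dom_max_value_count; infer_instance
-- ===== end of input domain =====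

-- B replaces A's per-hand counting dict by sort-then-scan (longest run of equal
-- consecutive extracted values): an alternative decomposition, not claimed faster.
-- Where A raises (empty hand: ValueError; empty-string card: IndexError) Pre_ excludes
-- the input; B's own scan would return 0 for an empty hand.

-- ===== PORT A =====
-- card[:-1] if card[:-1].isdigit() else card[0]  (shared by both Pythons verbatim;
-- the .getD "" default is unreachable: Python raises IndexError on card = "", excluded by Pre_)
def pvCardValue (card : String) : String :=
  let pre := PySem.Str.slice card none (some (-1))
  if PySem.Str.strIsdigit pre then pre
  else ((PySem.Str.pyGet? card 0).map (fun c => String.ofList [c])).getD ""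

def max_value_count (cards : List (String × List String)) : List (String × Int) :=
  let d := PySem.Dict.ofList cards
  (d.items.foldl (fun acc p =>
      let cards_dict := p.2.foldl (fun cd card =>
          cd.insert (pvCardValue card) (cd.getD (pvCardValue card) 0 + 1)) PySem.Dict.empty
      -- max(cards_dict.values()); ValueError on an empty hand is excluded by Pre_
      acc.insert p.1 ((PySem.List.max? cards_dict.values (fun x => x)).getD 0))
    PySem.Dict.empty).items

-- ===== PORT B =====
-- one step of B's run scan over the sorted values: state (best, run, prev)
def pvRunStep (s : Int × Int × Option String) (v : String) : Int × Int × Option String :=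
  let run := if some v == s.2.2 then s.2.1 + 1 else 1
  (if run > s.1 then run else s.1, run, some v)

def max_value_count_alt (cards : List (String × List String)) : List (String × Int) :=
  let d := PySem.Dict.ofList cards
  (d.items.foldl (fun acc p =>
      let values := PySem.List.sorted (p.2.map pvCardValue) (fun x => x) false
      acc.insert p.1 (values.foldl pvRunStep (0, 0, none)).1)
    PySem.Dict.empty).items

-- ===== PRECONDITION & SPEC =====
-- Pre_ excludes exactly the inputs where Python A raises: an empty hand (ValueError from
-- max of an empty dict) or an empty-string card (IndexError from card[0]), judged on the
-- dict A actually iterates (duplicate player keys are resolved by dict construction).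
def Pre_max_value_count (cards : List (String × List String)) : Prop :=
  ∀ p ∈ (PySem.Dict.ofList cards).items, p.2 ≠ [] ∧ ∀ c ∈ p.2, c ≠ ""
instance (cards : List (String × List String)) : Decidable (Pre_max_value_count cards) := by unfold Pre_max_value_count; infer_instance

def pvWitness_max_value_count : (List (String × List String)) :=
  [("alice", ["2H", "2S", "KD"]), ("bob", ["10C", "10D"])]

def Spec_max_value_count (cards : List (String × List String)) (out : List (String × Int)) : Prop := out = max_value_count_alt cards
instance (cards : List (String × List String)) (out : List (String × Int)) : Decidable (Spec_max_value_count cards out) := by unfold Spec_max_value_count; infer_instance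

-- ===== CLAIM (what is proved, stated in full; the proofs are below) =====
def Claim_equal_max_value_count : Prop := ∀ (cards : List (String × List String)), Dom_max_value_count cards → Pre_max_value_count cards → Spec_max_value_count cards (max_value_count cards)

-- ===== LEMMAS AND PROOFS =====

-- scanning k more copies of v, with v the previous value, extends the run to r + k
lemma pvRep (v : String) : ∀ (k : Nat) (b r : Int), r ≤ b →
    (List.replicate k v).foldl pvRunStep (b, r, some v) = (max b (r + k), r + k, some v) := by
  intro k
  induction k with
  | zero => intro b r h; simp [max_eq_left h]
  | succ k ih =>
    intro b r h
    rw [List.replicate_succ, List.foldl_cons]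
    have hstep : pvRunStep (b, r, some v) v = (max b (r + 1), r + 1, some v) := by
      simp [pvRunStep, max_def]
      split_ifs <;> omega
    rw [hstep, ih _ _ (le_max_right _ _)]
    congr 1
    · rw [max_assoc]; congr 1; push_cast; rw [max_eq_right (by omega)]; omega
    · push_cast; refine Prod.ext ?_ rfl; simp; omega

-- a sorted nonempty list starts with a block of copies of its head, absent afterwards
lemma pvDecomp : ∀ (t : List String) (v : String), (v :: t).Pairwise (· ≤ ·) →
    ∃ (k : Nat) (l₂ : List String), v :: t = List.replicate (k + 1) v ++ l₂ ∧ v ∉ l₂ ∧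
      l₂.Pairwise (· ≤ ·) := by
  intro t
  induction t with
  | nil => intro v _; exact ⟨0, [], by simp, by simp, by simp⟩
  | cons w t' ih =>
    intro v hp
    by_cases hvw : v = w
    · subst hvw
      obtain ⟨k, l₂, heq, hnm, hp₂⟩ := ih v hp.tail
      exact ⟨k + 1, l₂, by rw [List.replicate_succ, List.cons_append, ← heq], hnm, hp₂⟩
    · refine ⟨0, w :: t', by simp, ?_, hp.tail⟩
      intro hv
      rcases List.mem_cons.mp hv with h | h
      · exact hvw h
      · have h1 : v ≤ w := (List.pairwise_cons.mp hp).1 w (by simp)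
        have h2 : w ≤ v := (List.pairwise_cons.mp hp.tail).1 v h
        exact hvw (le_antisymm h1 h2)

-- discarding an element not in a set changes nothing
lemma pvDiscardNotMem (s : PySem.Set String) (v : String) (h : v ∉ s) : s.discard v = s := by
  unfold PySem.Set.discard
  refine List.filter_eq_self.mpr (fun a ha => ?_)
  simp only [Bool.not_eq_eq_eq_not, Bool.not_true, beq_eq_false_iff_ne, ne_eq]
  rintro rfl; exact h ha

-- set(replicate v ++ l₂) with v ∉ l₂ is v followed by set(l₂)
lemma pvOfListBlock (v : String) (l₂ : List String) (h : v ∉ l₂) :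
    ∀ k : Nat, PySem.Set.ofList (List.replicate (k + 1) v ++ l₂) = v :: PySem.Set.ofList l₂ := by
  intro k
  induction k with
  | zero =>
    simp only [Nat.zero_add, List.replicate_one, List.cons_append, List.nil_append, PySem.Set.ofList_cons]
    rw [pvDiscardNotMem _ _ (by simpa [PySem.Set.mem_ofList] using h)]
  | succ k ih =>
    rw [List.replicate_succ, List.cons_append, PySem.Set.ofList_cons, ih]
    congr 1
    unfold PySem.Set.discard
    rw [List.filter_cons_of_neg (by simp)]
    have := pvDiscardNotMem (PySem.Set.ofList l₂) v (by simpa [PySem.Set.mem_ofList] using h)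
    unfold PySem.Set.discard at this
    exact this

-- the run scan over a sorted list computes the fold of max over the multiplicities
lemma pvScan : ∀ (n : Nat) (l : List String), l.length ≤ n → l.Pairwise (· ≤ ·) →
    ∀ (b r : Int) (p : Option String), r ≤ b → (∀ x ∈ l, p ≠ some x) →
    (l.foldl pvRunStep (b, r, p)).1
      = ((PySem.List.dedup l).map (fun v => (l.count v : Int))).foldl max b := by
  intro n
  induction n with
  | zero =>
    intro l hl _ b r p hrb _
    rw [List.length_eq_zero_iff.mp (Nat.le_zero.mp hl)]
    simp [PySem.List.dedup]
  | succ n ih =>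
    intro l hl hpw b r p hrb hp
    match l, hl with
    | [], _ => simp [PySem.List.dedup_eq_ofList, PySem.Set.ofList]
    | v :: t, hl =>
      obtain ⟨k, l₂, heq, hnm, hpw₂⟩ := pvDecomp t v hpw
      rw [heq]
      -- length bookkeeping
      have hlen : l₂.length ≤ n := by
        have := congrArg List.length heq
        simp [List.length_replicate] at this
        simp at hl; omega
      -- the fold over the block
      rw [List.foldl_append]
      have hfirst : (List.replicate (k + 1) v).foldl pvRunStep (b, r, p)
          = (max b (k + 1), (k : Int) + 1, some v) := by
        rw [List.replicate_succ, List.foldl_cons]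
        have hne : (some v == p) = false := by
          cases p with
          | none => rfl
          | some w =>
            have : (some w : Option String) ≠ some v := hp v (by rw [heq]; simp)
            simp only [beq_eq_false_iff_ne, ne_eq]
            exact fun hc => this (by rw [hc])
        have hstep : pvRunStep (b, r, p) v = (max b 1, 1, some v) := by
          simp [pvRunStep, hne, max_def]; split_ifs <;> omega
        rw [hstep, pvRep v k _ _ (le_max_right _ _)]
        congr 1
        · rw [max_assoc]; congr 1; rw [max_eq_right (by omega)]; ring
        · refine Prod.ext ?_ rfl; simp; ring
      rw [hfirst]
      have hnotin : ∀ x ∈ l₂, (some v : Option String) ≠ some x := by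
        rintro x hx h; injection h with h'; subst h'; exact hnm hx
      rw [ih l₂ hlen hpw₂ _ _ _ (le_max_right _ _) hnotin]
      -- now the dedup/count side
      rw [PySem.List.dedup_eq_ofList, PySem.List.dedup_eq_ofList, pvOfListBlock v l₂ hnm k]
      rw [List.map_cons, List.foldl_cons]
      have hcv : (List.replicate (k + 1) v ++ l₂).count v = k + 1 := by
        rw [List.count_append, List.count_replicate_self, List.count_eq_zero_of_not_mem hnm]
      rw [hcv]
      have hmapeq : (PySem.Set.ofList l₂).map (fun w => ((List.replicate (k + 1) v ++ l₂).count w : Int))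
          = (PySem.Set.ofList l₂).map (fun w => (l₂.count w : Int)) := by
        refine List.map_congr_left (fun w hw => ?_)
        have hwv : w ≠ v := fun hc => hnm (by rw [← hc]; exact (PySem.Set.mem_ofList _ _).mp hw)
        have h0 : (List.replicate (k + 1) v).count w = 0 := by
          rw [List.count_replicate, if_neg (fun hc => hwv (beq_iff_eq.mp hc).symm)]
        rw [List.count_append, h0]
        simp
      rw [hmapeq]
      congr 1

-- per-player agreement: A's max over the counting dict = B's best run over the sorted values
lemma pvPerPlayer (hand : List String) (hne : hand ≠ []) :
    ((PySem.List.max? (hand.foldl (fun cd card =>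
        cd.insert (pvCardValue card) (cd.getD (pvCardValue card) 0 + 1)) PySem.Dict.empty).values
      (fun x => x)).getD 0)
    = ((PySem.List.sorted (hand.map pvCardValue) (fun x => x) false).foldl pvRunStep (0, 0, none)).1 := by
  have hfold : hand.foldl (fun cd card =>
      cd.insert (pvCardValue card) (cd.getD (pvCardValue card) 0 + 1)) PySem.Dict.empty
      = PySem.Dict.counter (hand.map pvCardValue) := by
    rw [← PySem.Dict.foldl_insert_getD_add_one_eq_counter, List.foldl_map]
  rw [hfold]
  set vs := hand.map pvCardValue with hdef
  have hvne : vs ≠ [] := by simp [hdef, hne]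
  have hvals : (PySem.Dict.counter vs).values
      = (PySem.Set.ofList vs).map (fun k => ((vs.count k : Nat) : Int)) := by
    unfold PySem.Dict.values
    rw [PySem.Dict.items_counter, List.map_map]; rfl
  obtain ⟨k0, krest, hk⟩ := List.exists_cons_of_ne_nil (l := PySem.Set.ofList vs)
    (by obtain ⟨y, t, h⟩ := List.exists_cons_of_ne_nil hvne
        rw [h, PySem.Set.ofList_cons]; simp)
  -- left side: max over the counter values
  rw [hvals, hk, List.map_cons, PySem.List.max?_id_cons, Option.getD_some]
  -- right side: the run scan
  have hsort := pvScan (PySem.List.sorted vs (fun x => x) false).length _ le_rfl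
    (by simpa using PySem.List.sorted_pairwise vs (fun x => x)) 0 0 none le_rfl (by simp)
  rw [hsort]
  -- counts in the sorted list are counts in vs
  have hperm : (PySem.List.sorted vs (fun x => x) false).Perm vs :=
    PySem.List.sorted_perm vs (fun x => x) false
  have hcnt : (PySem.List.dedup (PySem.List.sorted vs (fun x => x) false)).map
        (fun v => ((PySem.List.sorted vs (fun x => x) false).count v : Int))
      = (PySem.List.dedup (PySem.List.sorted vs (fun x => x) false)).map
        (fun v => (vs.count v : Int)) :=
    List.map_congr_left (fun w _ => by rw [hperm.count_eq])
  rw [hcnt]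
  -- the two dedup lists are permutations of each other
  have hdperm : (PySem.List.dedup (PySem.List.sorted vs (fun x => x) false)).Perm
      (PySem.List.dedup vs) := by
    rw [PySem.List.dedup_eq_ofList, PySem.List.dedup_eq_ofList]
    refine (List.perm_ext_iff_of_nodup (PySem.Set.nodup_ofList _) (PySem.Set.nodup_ofList _)).mpr
      (fun a => ?_)
    rw [PySem.Set.mem_ofList, PySem.Set.mem_ofList]
    exact ⟨fun h => hperm.mem_iff.mp h, fun h => hperm.mem_iff.mpr h⟩
  rw [(hdperm.map _).foldl_eq 0, PySem.List.dedup_eq_ofList, hk, List.map_cons, List.foldl_cons]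
  have hpos : (1 : Int) ≤ (vs.count k0 : Int) := by
    have : k0 ∈ vs := (PySem.Set.mem_ofList _ _).mp (by rw [hk]; simp)
    exact_mod_cast List.one_le_count_iff.mpr this
  rw [max_eq_right (by omega)]

-- ===== VERDICT (by name: the statement is the Claim_ definition above) =====
theorem max_value_count_spec : Claim_equal_max_value_count := by
  intro cards _ hpre
  unfold Spec_max_value_count max_value_count max_value_count_alt
  refine congrArg PySem.Dict.items (PySem.List.foldl_congr_mem
    (PySem.Dict.ofList cards).items _ _ PySem.Dict.empty (fun acc p hp => ?_))
  exact congrArg (acc.insert p.1) (pvPerPlayer p.2 ((hpre p hp).1))
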